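-- pv_equiv track=rewrite | github.com/tjthejuggler/py_habits_widget | habitdb_streak_finder.py | get_days_since_zero_custom_date
-- ===== SOURCE A (Python) =====
-- def get_days_since_zero_custom_date(inner_dict, target_date):
--     days_since_zero = None
--     sorted_dates = [d for d in inner_dict.keys() if d <= target_date]
--     sorted_dates.sort(reverse=True)
--     for index, date_str in enumerate(sorted_dates):
--         if inner_dict[date_str] == 0:
--             days_since_zero = index
--             break
--     if days_since_zero is None:
--         days_since_zero = len(sorted_dates)
--     return days_since_zero
-- ===== SOURCE B (Python) =====
-- def get_days_since_zero_custom_date(inner_dict, target_date):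
--     best = None
--     for k, v in inner_dict.items():
--         if v == 0 and k <= target_date and (best is None or k > best):
--             best = k
--     if best is None:
--         return sum(1 for k in inner_dict if k <= target_date)
--     return sum(1 for k in inner_dict if best < k <= target_date)
-- ===== Notes on version B (the rewrite author's own statement) =====
-- stated objective: alternative
-- what changed: B drops the descending sort and indexed scan: one linear pass finds the maximum zero-valued date <= target, and the answer is the count of dates strictly between it and the target (or of all dates <= target when no zero exists).
import Mathlib
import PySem

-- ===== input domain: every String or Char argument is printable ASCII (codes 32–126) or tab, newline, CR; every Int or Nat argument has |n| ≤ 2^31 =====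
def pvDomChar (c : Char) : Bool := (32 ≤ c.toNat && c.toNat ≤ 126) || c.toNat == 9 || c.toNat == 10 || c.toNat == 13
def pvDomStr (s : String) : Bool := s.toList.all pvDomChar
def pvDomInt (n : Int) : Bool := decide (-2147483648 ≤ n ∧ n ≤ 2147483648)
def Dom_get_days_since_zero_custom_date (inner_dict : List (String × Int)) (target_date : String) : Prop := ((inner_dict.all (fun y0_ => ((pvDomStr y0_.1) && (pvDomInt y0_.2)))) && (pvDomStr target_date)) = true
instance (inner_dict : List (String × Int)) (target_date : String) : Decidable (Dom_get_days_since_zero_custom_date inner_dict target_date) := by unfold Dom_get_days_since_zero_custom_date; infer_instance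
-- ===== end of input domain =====

-- B replaces A's filter + descending sort + scan by two sort-free linear passes: find the
-- maximum zero-valued date ≤ target, then count the dates strictly between it and the
-- target (objective: alternative algorithm). Return value only; neither mutates.

-- ===== PORT A =====
-- the 'for index, date_str in enumerate(sorted_dates): if inner_dict[date_str] == 0: break' loop
def pvFindZeroA (d : PySem.Dict String Int) : List String → Int → Option Int
  | [], _ => none
  | k :: rest, i => if d.get? k = some 0 then some i else pvFindZeroA d rest (i + 1)

def get_days_since_zero_custom_date (inner_dict : List (String × Int)) (target_date : String) : Int :=
  let d := PySem.Dict.ofList inner_dict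
  let sorted_dates := PySem.List.sorted (d.keys.filter (fun x => decide (x ≤ target_date))) (fun x => x) true
  match pvFindZeroA d sorted_dates 0 with
  | some i => i
  | none => (sorted_dates.length : Int)

-- ===== PORT B =====
-- one step of B's first pass: keep the largest zero-valued key ≤ target seen so far
def pvBestStep (target_date : String) (best : Option String) (p : String × Int) : Option String :=
  if p.2 == 0 && decide (p.1 ≤ target_date) && (match best with | none => true | some b => decide (b < p.1))
  then some p.1 else best

def get_days_since_zero_custom_date_alt (inner_dict : List (String × Int)) (target_date : String) : Int :=
  let d := PySem.Dict.ofList inner_dict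
  match d.items.foldl (pvBestStep target_date) none with
  | none => ((d.keys.filter (fun k => decide (k ≤ target_date))).length : Int)
  | some b => ((d.keys.filter (fun k => decide (b < k ∧ k ≤ target_date))).length : Int)

-- ===== PRECONDITION & SPEC =====
def Spec_get_days_since_zero_custom_date (inner_dict : List (String × Int)) (target_date : String) (out : Int) : Prop := out = get_days_since_zero_custom_date_alt inner_dict target_date
instance (inner_dict : List (String × Int)) (target_date : String) (out : Int) : Decidable (Spec_get_days_since_zero_custom_date inner_dict target_date out) := by unfold Spec_get_days_since_zero_custom_date; infer_instance

-- ===== CLAIM (what is proved, stated in full; the proofs are below) =====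
def Claim_equal_get_days_since_zero_custom_date : Prop := ∀ (inner_dict : List (String × Int)) (target_date : String), Dom_get_days_since_zero_custom_date inner_dict target_date → Spec_get_days_since_zero_custom_date inner_dict target_date (get_days_since_zero_custom_date inner_dict target_date)

-- ===== LEMMAS AND PROOFS =====

-- A's scan on a list with no zero-valued date returns none
lemma findA_none (d : PySem.Dict String Int) (L : List String) (i : Int)
    (h : ∀ k ∈ L, d.get? k ≠ some 0) : pvFindZeroA d L i = none := by
  induction L generalizing i with
  | nil => rfl
  | cons k rest ih =>
    simp only [pvFindZeroA]
    rw [if_neg (h k (List.mem_cons_self))]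
    exact ih (i + 1) (fun x hx => h x (List.mem_cons_of_mem _ hx))

-- A's scan on a strictly descending list returns i + (number of elements above the
-- largest zero-valued element b)
lemma findA_some (d : PySem.Dict String Int) (L : List String) (i : Int) (b : String)
    (hdesc : L.Pairwise (fun a c => c < a)) (hb : b ∈ L) (hbP : d.get? b = some 0)
    (hmax : ∀ k ∈ L, d.get? k = some 0 → k ≤ b) :
    pvFindZeroA d L i = some (i + (L.countP (fun k => decide (b < k)) : Int)) := by
  induction L generalizing i with
  | nil => cases hb
  | cons k rest ih =>
    simp only [pvFindZeroA]
    rcases List.pairwise_cons.mp hdesc with ⟨hklt, hrest⟩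
    by_cases hP : d.get? k = some 0
    · have hkb : k ≤ b := hmax k (List.mem_cons_self) hP
      have hbk : b = k := by
        rcases List.mem_cons.mp hb with hb1 | hb1
        · exact hb1
        · exact absurd (hklt b hb1) (not_lt.mpr hkb)
      subst hbk
      rw [if_pos hP]
      have h0 : (b :: rest).countP (fun x => decide (b < x)) = 0 := by
        rw [List.countP_eq_zero]
        intro x hx
        rcases List.mem_cons.mp hx with hx1 | hx1
        · simp [hx1]
        · simpa using not_lt.mpr (le_of_lt (hklt x hx1))
      rw [h0]; simp
    · rw [if_neg hP]
      have hbrest : b ∈ rest := by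
        rcases List.mem_cons.mp hb with hb1 | hb1
        · exact absurd hbP (hb1 ▸ hP)
        · exact hb1
      have hbk : b < k := hklt b hbrest
      have hc : (k :: rest).countP (fun x => decide (b < x))
          = rest.countP (fun x => decide (b < x)) + 1 := by
        rw [List.countP_cons]
        simp only [decide_eq_true hbk, if_true]
      rw [hc, ih (i + 1) hrest hbrest (fun x hx hxP => hmax x (List.mem_cons_of_mem _ hx) hxP)]
      congr 1
      push_cast
      ring

-- B's fold never loses a candidate: any zero-valued key ≤ target in l is ≤ the result
lemma foldBest_ge (t : String) (l : List (String × Int)) (acc : Option String)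
    (p : String × Int) (hp : p ∈ l) (hp0 : p.2 = 0) (hpt : p.1 ≤ t) :
    ∃ b, l.foldl (pvBestStep t) acc = some b ∧ p.1 ≤ b := by
  induction l generalizing acc with
  | nil => cases hp
  | cons q rest ih =>
    rcases List.mem_cons.mp hp with hp1 | hp1
    · subst hp1
      -- after processing p the accumulator is some c with p.1 ≤ c; then it only grows
      have step : ∃ c, pvBestStep t acc p = some c ∧ p.1 ≤ c := by
        unfold pvBestStep
        match acc with
        | none => exact ⟨p.1, by simp [hp0, hpt], le_refl _⟩
        | some a =>
          by_cases hlt : a < p.1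
          · exact ⟨p.1, by simp [hp0, hpt, hlt], le_refl _⟩
          · exact ⟨a, by simp [hp0, hpt, hlt], not_lt.mp hlt⟩
      rcases step with ⟨c, hc, hpc⟩
      -- the accumulator value never decreases along the fold
      have grow : ∀ (L : List (String × Int)) (c : String),
          ∃ b, L.foldl (pvBestStep t) (some c) = some b ∧ c ≤ b := by
        intro L
        induction L with
        | nil => exact fun c => ⟨c, rfl, le_refl _⟩
        | cons q' rest' ih' =>
          intro c
          simp only [List.foldl_cons]
          unfold pvBestStep
          by_cases h : (q'.2 == 0 && decide (q'.1 ≤ t) && decide (c < q'.1)) = true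
          · rw [if_pos h]
            rcases ih' q'.1 with ⟨b, hb, hqb⟩
            refine ⟨b, hb, le_trans (le_of_lt ?_) hqb⟩
            simp only [Bool.and_eq_true, decide_eq_true_eq] at h
            exact h.2
          · rw [if_neg h]
            exact ih' c
      simp only [List.foldl_cons, hc]
      rcases grow rest c with ⟨b, hb, hcb⟩
      exact ⟨b, hb, le_trans hpc hcb⟩
    · simp only [List.foldl_cons]
      exact ih (pvBestStep t acc q) hp1

-- one step of B's fold either keeps the accumulator or moves to a zero-valued key ≤ target
lemma step_cases (t : String) (acc : Option String) (q : String × Int) :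
    pvBestStep t acc q = acc ∨ (pvBestStep t acc q = some q.1 ∧ q.2 = 0 ∧ q.1 ≤ t) := by
  cases acc with
  | none =>
    unfold pvBestStep
    by_cases h : (q.2 == 0 && decide (q.1 ≤ t)) = true
    · rw [if_pos (by rw [Bool.and_true]; exact h)]
      simp only [Bool.and_eq_true, beq_iff_eq, decide_eq_true_eq] at h
      exact Or.inr ⟨rfl, h.1, h.2⟩
    · rw [if_neg (by rw [Bool.and_true]; exact h)]
      exact Or.inl rfl
  | some a =>
    unfold pvBestStep
    by_cases h : (q.2 == 0 && decide (q.1 ≤ t) && decide (a < q.1)) = true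
    · rw [if_pos h]
      simp only [Bool.and_eq_true, beq_iff_eq, decide_eq_true_eq] at h
      exact Or.inr ⟨rfl, h.1.1, h.1.2⟩
    · rw [if_neg h]
      exact Or.inl rfl

-- B's fold result (from acc = none) is the key of some zero-valued item ≤ target
lemma foldBest_mem (t : String) (l : List (String × Int)) (b : String)
    (h : l.foldl (pvBestStep t) none = some b) :
    ∃ p ∈ l, p.1 = b ∧ p.2 = 0 ∧ p.1 ≤ t := by
  -- generalized over any accumulator
  suffices H : ∀ (l : List (String × Int)) (acc : Option String) (b : String),
      l.foldl (pvBestStep t) acc = some b →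
      acc = some b ∨ ∃ p ∈ l, p.1 = b ∧ p.2 = 0 ∧ p.1 ≤ t by
    rcases H l none b h with h' | h'
    · cases h'
    · exact h'
  intro l
  induction l with
  | nil => intro acc b h; exact Or.inl h
  | cons q rest ih =>
    intro acc b hfold
    simp only [List.foldl_cons] at hfold
    rcases ih (pvBestStep t acc q) b hfold with h' | h'
    · rcases step_cases t acc q with hstep | ⟨hstep, h0, hle⟩
      · exact Or.inl (hstep ▸ h')
      · rw [hstep] at h'
        injection h' with h''
        exact Or.inr ⟨q, List.mem_cons_self, h'', h0, hle⟩
    · rcases h' with ⟨p, hm, hr⟩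
      exact Or.inr ⟨p, List.mem_cons_of_mem _ hm, hr⟩

-- main equivalence
lemma main_eq (inner_dict : List (String × Int)) (t : String) :
    get_days_since_zero_custom_date inner_dict t
      = get_days_since_zero_custom_date_alt inner_dict t := by
  simp only [get_days_since_zero_custom_date, get_days_since_zero_custom_date_alt]
  set d := PySem.Dict.ofList inner_dict with hd
  have hnodup : d.keys.Nodup := PySem.Dict.nodup_keys_ofList inner_dict
  set F := d.keys.filter (fun x => decide (x ≤ t)) with hF
  have hFnodup : F.Nodup := hnodup.filter _
  set S := PySem.List.sorted F (fun x => x) true with hS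
  have hperm : S.Perm F := PySem.List.sorted_perm F (fun x => x) true
  have hSnodup : S.Nodup := hperm.nodup_iff.mpr hFnodup
  have hdesc : S.Pairwise (fun a c => c < a) := by
    have h1 : S.Pairwise (fun a c => c ≤ a) := PySem.List.sorted_pairwise_rev F (fun x => x)
    have h2 := List.Pairwise.and h1 (List.Pairwise.imp (fun h => h) hSnodup)
    exact h2.imp (fun h => lt_of_le_of_ne h.1 (fun he => h.2 he.symm))
  have hmemS : ∀ k, k ∈ S ↔ (k ∈ d.keys ∧ k ≤ t) := by
    intro k
    rw [hperm.mem_iff, hF, List.mem_filter]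
    simp
  by_cases hzero : ∃ k ∈ S, d.get? k = some 0
  · -- some zero-valued date ≤ target exists; B's fold finds its maximum b
    rcases hzero with ⟨k0, hk0S, hk0P⟩
    have hk0keys : k0 ∈ d.keys ∧ k0 ≤ t := (hmemS k0).mp hk0S
    have hk0item : (k0, (0 : Int)) ∈ d.items := PySem.Dict.mem_items_of_get?_eq_some d hk0P
    rcases foldBest_ge t d.items none (k0, 0) hk0item rfl hk0keys.2 with ⟨b, hb, _⟩
    rcases foldBest_mem t d.items b hb with ⟨p, hpmem, hpb, hp0, hpt⟩
    have hbP : d.get? b = some 0 := by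
      have h1 := PySem.Dict.get?_of_mem_items d hpmem hnodup
      rw [hpb, hp0] at h1
      exact h1
    have hbS : b ∈ S := (hmemS b).mpr ⟨hpb ▸ PySem.Dict.mem_keys_of_mem_items d hpmem, hpb ▸ hpt⟩
    have hmax : ∀ k ∈ S, d.get? k = some 0 → k ≤ b := by
      intro k hkS hkP
      have hk := (hmemS k).mp hkS
      have hkitem : (k, (0 : Int)) ∈ d.items := PySem.Dict.mem_items_of_get?_eq_some d hkP
      rcases foldBest_ge t d.items none (k, 0) hkitem rfl hk.2 with ⟨b', hb', hkb'⟩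
      rw [hb] at hb'
      injection hb' with hb''
      exact hb'' ▸ hkb'
    rw [findA_some d S 0 b hdesc hbS hbP hmax, hb]
    simp only [zero_add]
    congr 1
    rw [hperm.countP_eq, hF, List.countP_filter, ← List.countP_eq_length_filter]
    congr 1
    funext k
    by_cases h1 : b < k <;> by_cases h2 : k ≤ t <;> simp [h1, h2]
  · -- no zero-valued date ≤ target: both count all the dates ≤ target
    rw [not_exists] at hzero
    simp only [not_and] at hzero
    rw [findA_none d S 0 hzero]
    have hfold : d.items.foldl (pvBestStep t) none = none := by
      by_contra hne
      rcases Option.ne_none_iff_exists'.mp hne with ⟨b, hb⟩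
      rcases foldBest_mem t d.items b hb with ⟨p, hpmem, hpb, hp0, hpt⟩
      have hPb : d.get? p.1 = some 0 := by
        have h1 := PySem.Dict.get?_of_mem_items d hpmem hnodup
        rw [hp0] at h1; exact h1
      exact hzero p.1 ((hmemS p.1).mpr ⟨PySem.Dict.mem_keys_of_mem_items d hpmem, hpt⟩) hPb
    rw [hfold]
    simp only [hperm.length_eq]

-- ===== VERDICT (by name: the statement is the Claim_ definition above) =====
theorem get_days_since_zero_custom_date_spec : Claim_equal_get_days_since_zero_custom_date := by
  intro inner_dict target_date _
  unfold Spec_get_days_since_zero_custom_date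
  exact main_eq inner_dict target_date
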